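-- pv_equiv track=rewrite | github.com/nanzy26/NinetyOneChallenge | num_to_words.py | num_below_thousand
-- ===== SOURCE A (Python) =====
-- nums = {0: 'zero', 1: 'one', 2: 'two', 3: 'three', 4: 'four', 5: 'five', 6: 'six', 7: 'seven', 8: 'eight', 9: 'nine',
--         10: 'ten', 11: 'eleven', 12: 'twelve', 13: 'thirteen', 14: 'fourteen', 15: 'fifteen', 16: 'sixteen',
--         17: 'seventeen', 18: 'eighteen', 19: 'nineteen', 20: 'twenty', 30: 'thirty', 40: 'forty', 50: 'fifty',
--         60: 'sixty', 70: 'seventy', 80: 'eighty', 90: 'ninety', 100: 'hundred', 1000: 'thousand', 1000000: 'million',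
--         1000000000: 'billion', 1000000000000: 'trillion'}
--
-- kilo = 1000
--
-- def num_below_thousand(num):
--     """
--     handles numbers below a thousand and refers to nums dictionary
--     :param num: int value of number
--     :return: word representation of number below 1000
--     """
--     assert (num >= 0)
--     if num == 0:
--         return ''
--     if num < 20:  # anything under 20 has its own number
--         return nums[num]
--     elif num < 100:
--         if num % 10 == 0:
--             return (nums[num // 10 * 10]).strip()
--         else:
--             return (nums[num // 10 * 10] + '-' + nums[num % 10]).strip()
--     elif num < kilo:
--         end = num_below_thousand(num % 100)
--         join = ''
--         if end:
--             join = ' and ' if num % 100 < 100 else ' '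
--         return (nums[num // 100] + ' hundred' + join + end).strip()
-- ===== SOURCE B (Python) =====
-- nums = {0: 'zero', 1: 'one', 2: 'two', 3: 'three', 4: 'four', 5: 'five', 6: 'six', 7: 'seven', 8: 'eight', 9: 'nine',
--         10: 'ten', 11: 'eleven', 12: 'twelve', 13: 'thirteen', 14: 'fourteen', 15: 'fifteen', 16: 'sixteen',
--         17: 'seventeen', 18: 'eighteen', 19: 'nineteen', 20: 'twenty', 30: 'thirty', 40: 'forty', 50: 'fifty',
--         60: 'sixty', 70: 'seventy', 80: 'eighty', 90: 'ninety', 100: 'hundred', 1000: 'thousand', 1000000: 'million',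
--         1000000000: 'billion', 1000000000000: 'trillion'}
--
-- def num_below_thousand(num):
--     assert (num >= 0)
--     if num == 0:
--         return ''
--     hundreds, rest = divmod(num, 100)
--     parts = []
--     if hundreds:
--         parts.append(nums[hundreds] + ' hundred')
--     if hundreds and rest:
--         parts.append('and')
--     if rest:
--         if rest < 20 or rest % 10 == 0:
--             parts.append(nums[rest])
--         else:
--             parts.append(nums[rest // 10 * 10] + '-' + nums[rest % 10])
--     return ' '.join(parts)
-- ===== Notes on version B (the rewrite author's own statement) =====
-- stated objective: simpler
-- what changed: Replaces the recursive three-branch chain (with its strip() calls and dead ' ' join path) by one divmod(num,100) followed by direct assembly of a parts list joined with spaces.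
-- outside the precondition, e.g. on num_below_thousand(-1): A raises AssertionError, B raises AssertionError; on num_below_thousand(1000): A returns None, B returns 'ten hundred'
import Mathlib
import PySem

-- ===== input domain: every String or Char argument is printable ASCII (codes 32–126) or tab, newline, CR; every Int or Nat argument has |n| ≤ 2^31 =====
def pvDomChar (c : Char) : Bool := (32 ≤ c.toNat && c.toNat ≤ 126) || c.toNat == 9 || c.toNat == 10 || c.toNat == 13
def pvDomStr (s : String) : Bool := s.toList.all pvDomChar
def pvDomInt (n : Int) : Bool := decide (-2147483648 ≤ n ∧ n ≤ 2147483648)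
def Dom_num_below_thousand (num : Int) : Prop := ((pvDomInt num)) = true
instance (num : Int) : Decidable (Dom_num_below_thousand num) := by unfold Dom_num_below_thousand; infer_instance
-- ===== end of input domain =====

-- B replaces A's recursive three-branch chain by one divmod(num,100) and direct assembly of a
-- parts list joined with spaces (objective: simpler).

-- shared module-level constant 'nums' (both Pythons use the same dictionary)
def pvNums : PySem.Dict Int String := PySem.Dict.ofList
  [(0, "zero"), (1, "one"), (2, "two"), (3, "three"), (4, "four"), (5, "five"), (6, "six"),
   (7, "seven"), (8, "eight"), (9, "nine"), (10, "ten"), (11, "eleven"), (12, "twelve"),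
   (13, "thirteen"), (14, "fourteen"), (15, "fifteen"), (16, "sixteen"), (17, "seventeen"),
   (18, "eighteen"), (19, "nineteen"), (20, "twenty"), (30, "thirty"), (40, "forty"),
   (50, "fifty"), (60, "sixty"), (70, "seventy"), (80, "eighty"), (90, "ninety"),
   (100, "hundred"), (1000, "thousand"), (1000000, "million"), (1000000000, "billion"),
   (1000000000000, "trillion")]

-- ===== PORT A =====
-- nums[k] would raise KeyError on a missing key; inside Pre_ every looked-up key is present,
-- so getD "" is exact there.  The assert (num >= 0) and the fall-through returning None for
-- num >= 1000 are excluded by Pre_.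
def num_below_thousand (num : Int) : String :=
  if num = 0 then ""
  else if num < 20 then pvNums.getD num ""
  else if num < 100 then
    if PySem.Int.mod num 10 = 0 then
      PySem.Str.strip (pvNums.getD (PySem.Int.floordiv num 10 * 10) "")
    else
      PySem.Str.strip (pvNums.getD (PySem.Int.floordiv num 10 * 10) "" ++ "-" ++
                       pvNums.getD (PySem.Int.mod num 10) "")
  else if _h : num < 1000 then
    let e := num_below_thousand (PySem.Int.mod num 100)
    let join := if e ≠ "" then (if PySem.Int.mod num 100 < 100 then " and " else " ") else ""
    PySem.Str.strip (pvNums.getD (PySem.Int.floordiv num 100) "" ++ " hundred" ++ join ++ e)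
  else ""  -- A falls off the if-chain here (returns None); outside Pre_
termination_by num.toNat
decreasing_by
  simp only [PySem.Int.mod, Int.fmod_eq_emod]
  omega

-- ===== PORT B =====
def num_below_thousand_alt (num : Int) : String :=
  if num = 0 then ""
  else
    let hundreds := PySem.Int.floordiv num 100
    let rest := PySem.Int.mod num 100
    let parts : List String :=
      (if hundreds ≠ 0 then [pvNums.getD hundreds "" ++ " hundred"] else []) ++
      (if hundreds ≠ 0 ∧ rest ≠ 0 then ["and"] else []) ++
      (if rest ≠ 0 then
        [if rest < 20 ∨ PySem.Int.mod rest 10 = 0 then pvNums.getD rest ""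
         else pvNums.getD (PySem.Int.floordiv rest 10 * 10) "" ++ "-" ++
              pvNums.getD (PySem.Int.mod rest 10) ""]
       else [])
    PySem.Str.join " " parts

-- ===== PRECONDITION & SPEC =====
-- A raises AssertionError for num < 0 and falls off the if-chain (returns None, not a str)
-- for num >= 1000; Pre_ admits exactly the inputs on which A returns a string.
def Pre_num_below_thousand (num : Int) : Prop := 0 ≤ num ∧ num < 1000
instance (num : Int) : Decidable (Pre_num_below_thousand num) := by
  unfold Pre_num_below_thousand; infer_instance
def pvWitness_num_below_thousand : Int := 123
def Spec_num_below_thousand (num : Int) (out : String) : Prop := out = num_below_thousand_alt num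
instance (num : Int) (out : String) : Decidable (Spec_num_below_thousand num out) := by
  unfold Spec_num_below_thousand; infer_instance

-- ===== CLAIM (what is proved, stated in full; the proofs are below) =====
def Claim_equal_num_below_thousand : Prop := ∀ (num : Int), Dom_num_below_thousand num → Pre_num_below_thousand num → Spec_num_below_thousand num (num_below_thousand num)

-- ===== LEMMAS AND PROOFS =====

-- the non-recursive part of port A's body (its num < 100 behaviour)
def nbtSmall (num : Int) : String :=
  if num = 0 then ""
  else if num < 20 then pvNums.getD num ""
  else if PySem.Int.mod num 10 = 0 then
    PySem.Str.strip (pvNums.getD (PySem.Int.floordiv num 10 * 10) "")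
  else
    PySem.Str.strip (pvNums.getD (PySem.Int.floordiv num 10 * 10) "" ++ "-" ++
                     pvNums.getD (PySem.Int.mod num 10) "")

-- B's inline formatting of the sub-hundred part
def wB (rest : Int) : String :=
  if rest < 20 ∨ PySem.Int.mod rest 10 = 0 then pvNums.getD rest ""
  else pvNums.getD (PySem.Int.floordiv rest 10 * 10) "" ++ "-" ++
       pvNums.getD (PySem.Int.mod rest 10) ""

-- nonempty with non-whitespace first and last character
def okW (s : String) : Bool :=
  (match s.toList.head? with | some c => !PySem.Chars.isspace c | none => false) &&
  (match s.toList.getLast? with | some c => !PySem.Chars.isspace c | none => false)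

lemma nbt_small (num : Int) (h : num < 100) : num_below_thousand num = nbtSmall num := by
  rw [num_below_thousand, nbtSmall]
  split_ifs <;> first | omega | rfl

lemma chars_strip_noop (l : List Char)
    (h1 : ∀ c ∈ l.head?, PySem.Chars.isspace c = false)
    (h2 : ∀ c ∈ l.getLast?, PySem.Chars.isspace c = false)
    (hne : l ≠ []) : PySem.Chars.strip l = l := by
  unfold PySem.Chars.strip PySem.Chars.lstrip PySem.Chars.rstrip
  obtain ⟨c, l', rfl⟩ := List.exists_cons_of_ne_nil hne
  rw [List.dropWhile_cons, if_neg (by simp [h1 c rfl])]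
  cases hr : (c :: l').reverse with
  | nil => simp at hr
  | cons d r =>
    have hd : (c :: l').getLast? = some d := by
      rw [← List.head?_reverse, hr]; rfl
    have hds : PySem.Chars.isspace d = false := by
      simpa using h2 d (by rw [hd]; rfl)
    rw [List.dropWhile_cons]
    simp only [hds, Bool.false_eq_true, if_false]
    rw [← hr, List.reverse_reverse]

lemma str_strip_noop (s : String) (h : okW s = true) : PySem.Str.strip s = s := by
  unfold okW at h
  rw [Bool.and_eq_true] at h
  obtain ⟨ha, hb⟩ := h
  have hne : s.toList ≠ [] := by
    intro hnil; rw [hnil] at ha; simp at ha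
  rw [PySem.Str.strip, chars_strip_noop s.toList ?_ ?_ hne, String.ofList_toList]
  · intro c hc
    cases hh : s.toList.head? with
    | none => rw [hh] at hc; simp at hc
    | some d =>
      rw [hh] at hc ha; cases hc; simpa using ha
  · intro c hc
    cases hh : s.toList.getLast? with
    | none => rw [hh] at hc; simp at hc
    | some d =>
      rw [hh] at hc hb; cases hc; simpa using hb

lemma okW_ne_empty (s : String) (h : okW s = true) : s ≠ "" := by
  intro rfl_; subst rfl_; simp [okW] at h

set_option maxRecDepth 10000 in
set_option maxHeartbeats 2000000 in
lemma small_ok : ∀ n : Nat, n < 100 → 1 ≤ n →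
    nbtSmall (n : Int) = wB (n : Int) ∧ okW (nbtSmall (n : Int)) = true := by
  decide

set_option maxRecDepth 10000 in
lemma hundreds_ok : ∀ k : Nat, k < 10 → 1 ≤ k →
    okW (pvNums.getD (k : Int) "" ++ " hundred") = true := by
  decide

lemma join_singleton_str (w : String) : PySem.Str.join " " [w] = w := by
  rw [PySem.Str.join]
  simp [PySem.Chars.join, List.intercalate, String.ofList_toList]

lemma join_three_str (a c : String) :
    PySem.Str.join " " [a, "and", c] = a ++ " and " ++ c := by
  rw [← String.toList_inj]
  rw [PySem.Str.join]
  simp [PySem.Chars.join, List.intercalate, String.toList_append]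

lemma nbt_mod_eq (num : Int) : PySem.Int.mod num 100 = num % 100 := by
  rw [PySem.Int.mod, Int.fmod_eq_emod]; norm_num

lemma nbt_div_eq (num : Int) : PySem.Int.floordiv num 100 = num / 100 := by
  rw [PySem.Int.floordiv, Int.fdiv_eq_ediv]; norm_num

lemma okW_append3 (x m y : String) (hx : okW x = true) (hy : okW y = true) :
    okW (x ++ m ++ y) = true := by
  unfold okW at *
  rw [Bool.and_eq_true] at hx hy ⊢
  obtain ⟨hx1, _⟩ := hx
  obtain ⟨_, hy2⟩ := hy
  constructor
  · cases hl : x.toList with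
    | nil => rw [hl] at hx1; simp at hx1
    | cons c cs =>
      rw [hl] at hx1
      simp [String.toList_append, hl]
      simpa using hx1
  · cases hl : y.toList.getLast? with
    | none =>
      rw [hl] at hy2; simp at hy2
    | some d =>
      rw [hl] at hy2
      simp [String.toList_append, List.getLast?_append, hl]
      simpa using hy2

-- ===== VERDICT (by name: the statement is the Claim_ definition above) =====
theorem num_below_thousand_spec : Claim_equal_num_below_thousand := by
  intro num _ hpre
  unfold Spec_num_below_thousand
  obtain ⟨h0, h1⟩ := hpre
  unfold num_below_thousand_alt
  by_cases hz : num = 0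
  · subst hz
    rw [nbt_small 0 (by norm_num), if_pos rfl]
    rfl
  · rw [if_neg hz]
    simp only [nbt_mod_eq, nbt_div_eq]
    by_cases hsm : num < 100
    · -- sub-hundred case: hundreds = 0, rest = num
      have hd0 : num / 100 = 0 := by omega
      have hm0 : num % 100 = num := by omega
      rw [nbt_small num hsm, hd0, hm0]
      rw [if_neg (show ¬((0 : Int) ≠ 0) by simp),
          if_neg (show ¬((0 : Int) ≠ 0 ∧ num ≠ 0) by simp),
          if_pos (show num ≠ 0 from hz)]
      simp only [List.nil_append]
      rw [join_singleton_str]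
      have hsw := (small_ok num.toNat (by omega) (by omega)).1
      rw [show ((num.toNat : Nat) : Int) = num by omega] at hsw
      rw [hsw]
      simp only [wB]
    · -- hundreds case
      obtain ⟨kn, hkn, hkn1, hkn2⟩ :
          ∃ kn : Nat, num / 100 = (kn : Int) ∧ 1 ≤ kn ∧ kn < 10 :=
        ⟨(num / 100).toNat, by omega, by omega, by omega⟩
      have hknz : (kn : Int) ≠ 0 := by omega
      rw [num_below_thousand, if_neg hz, if_neg (by omega), if_neg hsm, dif_pos h1]
      simp only [nbt_mod_eq, nbt_div_eq, hkn]
      rw [nbt_small _ (by omega)]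
      by_cases hr : num % 100 = 0
      · -- rest = 0 : no 'and', no tail word
        rw [hr, show nbtSmall (0 : Int) = "" from rfl]
        rw [if_neg (show ¬(("" : String) ≠ "") by simp),
            if_pos hknz,
            if_neg (show ¬((kn : Int) ≠ 0 ∧ (0 : Int) ≠ 0) by simp),
            if_neg (show ¬((0 : Int) ≠ 0) by simp)]
        simp only [List.append_nil]
        rw [join_singleton_str]
        calc PySem.Str.strip (pvNums.getD (kn : Int) "" ++ " hundred" ++ "" ++ "")
            = PySem.Str.strip (pvNums.getD (kn : Int) "" ++ " hundred") := by
              rw [← String.toList_inj]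
              simp [PySem.Str.strip, String.toList_append]
          _ = pvNums.getD (kn : Int) "" ++ " hundred" :=
              str_strip_noop _ (hundreds_ok kn hkn2 hkn1)
      · -- rest ≥ 1
        obtain ⟨hsw, hok⟩ := small_ok (num % 100).toNat (by omega) (by omega)
        rw [show (((num % 100).toNat : Nat) : Int) = num % 100 by omega] at hsw hok
        rw [if_pos (show nbtSmall (num % 100) ≠ "" from okW_ne_empty _ hok),
            if_pos (show num % 100 < 100 by omega),
            if_pos hknz,
            if_pos (show (kn : Int) ≠ 0 ∧ num % 100 ≠ 0 from ⟨hknz, hr⟩),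
            if_pos (show num % 100 ≠ 0 from hr)]
        simp only [List.cons_append, List.nil_append]
        rw [join_three_str]
        have harg :
            pvNums.getD (kn : Int) "" ++ " hundred" ++ " and " ++ nbtSmall (num % 100)
              = (pvNums.getD (kn : Int) "" ++ " hundred") ++ " and " ++ nbtSmall (num % 100) := by
          rw [← String.toList_inj]
        rw [harg,
            str_strip_noop _ (okW_append3 _ " and " _ (hundreds_ok kn hkn2 hkn1) hok),
            hsw]
        simp only [wB]
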